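-- pv_equiv track=rewrite | github.com/seva-arkh/it-academy-summer | src/Homework3/OrderedList.py | zero_right
-- ===== SOURCE A (Python) =====
-- def zero_right(list_):
--     list_1 = []
--     list_2 = []
--     for el in list_:
--         if el:
--             list_1.append(el)
--         else:
--             list_2.append(el)
--     list_1.extend(list_2)
--     return list_1
-- ===== SOURCE B (Python) =====
-- def zero_right(list_):
--     return sorted(list_, key=lambda x: not x)
-- ===== Notes on version B (the rewrite author's own statement) =====
-- stated objective: idiomatic
-- what changed: Replaced the explicit two-list partition loop with a single stable sort keyed on falsiness (key=lambda x: not x), which keeps truthy elements first in original order.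
import Mathlib
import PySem

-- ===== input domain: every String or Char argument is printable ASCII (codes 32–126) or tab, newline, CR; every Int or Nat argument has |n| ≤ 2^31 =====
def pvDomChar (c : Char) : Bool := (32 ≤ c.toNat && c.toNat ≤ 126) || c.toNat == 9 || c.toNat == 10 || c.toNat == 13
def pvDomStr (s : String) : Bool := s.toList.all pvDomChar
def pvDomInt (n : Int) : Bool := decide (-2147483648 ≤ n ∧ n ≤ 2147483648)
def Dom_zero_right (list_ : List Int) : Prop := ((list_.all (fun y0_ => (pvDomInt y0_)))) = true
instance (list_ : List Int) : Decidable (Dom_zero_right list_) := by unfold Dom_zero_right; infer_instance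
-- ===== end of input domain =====

-- B replaces A's explicit two-list partition loop with one stable sort keyed on falsiness (idiomatic).


-- ===== PORT A =====
-- the loop appends el to list_1 (truthy, i.e. el ≠ 0) or list_2 (falsy), then list_1.extend(list_2)
def zero_right (list_ : List Int) : List Int :=
  let p := list_.foldl
    (fun (st : List Int × List Int) el =>
      if el ≠ 0 then (st.1 ++ [el], st.2) else (st.1, st.2 ++ [el]))
    ([], [])
  p.1 ++ p.2

-- ===== PORT B =====
-- sorted(list_, key=lambda x: not x): key False(=0) for truthy, True(=1) for falsy
def zero_right_alt (list_ : List Int) : List Int :=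
  PySem.List.sorted list_ (fun x => if x = 0 then (1 : Int) else 0)

-- ===== PRECONDITION & SPEC =====
def Spec_zero_right (list_ : List Int) (out : List Int) : Prop := out = zero_right_alt list_
instance (list_ : List Int) (out : List Int) : Decidable (Spec_zero_right list_ out) := by unfold Spec_zero_right; infer_instance

-- ===== CLAIM (what is proved, stated in full; the proofs are below) =====
def Claim_equal_zero_right : Prop := ∀ (list_ : List Int), Dom_zero_right list_ → Spec_zero_right list_ (zero_right list_)

-- ===== LEMMAS AND PROOFS =====

def pvKey : Int → Int := fun x => if x = 0 then 1 else 0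

def pvBefore : Int → Int → Bool := fun a b => decide (pvKey a < pvKey b)

theorem ins_zero (x : Int) (hx : x = 0) (ys : List Int) :
    PySem.List.insertBy pvBefore x ys = ys ++ [x] := by
  apply PySem.List.insertBy_of_forall_not_before
  intro y _
  simp [pvBefore, pvKey, hx]
  split_ifs <;> omega

theorem ins_nonzero (x : Int) (hx : x ≠ 0) (T F : List Int)
    (hT : ∀ y ∈ T, y ≠ 0) (hF : ∀ y ∈ F, y = 0) :
    PySem.List.insertBy pvBefore x (T ++ F) = T ++ x :: F := by
  induction T with
  | nil =>
    simp only [List.nil_append]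
    cases F with
    | nil => simp [PySem.List.insertBy]
    | cons z zs =>
      have hz : z = 0 := hF z (by simp)
      simp [PySem.List.insertBy, pvBefore, pvKey, hx, hz]
  | cons t ts ih =>
    have ht : t ≠ 0 := hT t (by simp)
    have : pvBefore x t = false := by
      simp [pvBefore, pvKey, hx, ht]
    simp only [List.cons_append, PySem.List.insertBy, this, Bool.false_eq_true, if_false]
    rw [ih (fun y hy => hT y (by simp [hy])) ]

theorem main_inv (xs : List Int) (l1 l2 : List Int)
    (h1 : ∀ y ∈ l1, y ≠ 0) (h2 : ∀ y ∈ l2, y = 0) :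
    xs.foldl (fun acc x => PySem.List.insertBy pvBefore x acc) (l1 ++ l2)
      = (xs.foldl (fun (st : List Int × List Int) el =>
          if el ≠ 0 then (st.1 ++ [el], st.2) else (st.1, st.2 ++ [el])) (l1, l2)).1
        ++ (xs.foldl (fun (st : List Int × List Int) el =>
          if el ≠ 0 then (st.1 ++ [el], st.2) else (st.1, st.2 ++ [el])) (l1, l2)).2 := by
  induction xs generalizing l1 l2 with
  | nil => simp
  | cons x xs ih =>
    by_cases hx : x = 0
    · have hins : PySem.List.insertBy pvBefore x (l1 ++ l2) = l1 ++ (l2 ++ [x]) := by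
        rw [ins_zero x hx, List.append_assoc]
      simp only [List.foldl_cons]
      rw [hins, if_neg (by simp [hx])]
      exact ih l1 (l2 ++ [x]) h1 (by
        intro y hy
        rcases List.mem_append.1 hy with h | h
        · exact h2 y h
        · have : y = x := by simpa using h
          omega)
    · have hins : PySem.List.insertBy pvBefore x (l1 ++ l2) = (l1 ++ [x]) ++ l2 := by
        rw [ins_nonzero x hx l1 l2 h1 h2, List.append_assoc]; simp
      simp only [List.foldl_cons]
      rw [hins, if_pos (by simp [hx])]
      exact ih (l1 ++ [x]) l2 (by
        intro y hy
        rcases List.mem_append.1 hy with h | h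
        · exact h1 y h
        · have : y = x := by simpa using h
          simpa [this] using hx) h2

-- ===== VERDICT (by name: the statement is the Claim_ definition above) =====
theorem zero_right_spec : Claim_equal_zero_right := by
  intro list_ _
  unfold Spec_zero_right zero_right zero_right_alt
  rw [PySem.List.sorted_eq_foldl_insertBy]
  have := main_inv list_ [] [] (by simp) (by simp)
  simp only [List.nil_append] at this
  exact this.symm
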